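-- pv_equiv track=rewrite | github.com/20127304-AQ/Tic-Tac-Toe | AdversarialSearch.py | calculateXO
-- ===== SOURCE A (Python) =====
-- def calculateXO(line):
--     TotalX = 0
--     TotalO = 0
--     TotalEmpty = 0
--     for i in range(len(line)):
--         if line[i] == 1: TotalO += 1
--         if line[i] == 2: TotalX += 1
--         if line[i] == 0: TotalEmpty += 1
--     return TotalO, TotalX, TotalEmpty
-- ===== SOURCE B (Python) =====
-- def calculateXO(line):
--     return line.count(1), line.count(2), line.count(0)
-- ===== Notes on version B (the rewrite author's own statement) =====
-- stated objective: idiomatic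
-- what changed: Replaced the single indexed loop with three conditional accumulators by three independent list.count scans returning the (O, X, Empty) tuple directly.
import Mathlib
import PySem

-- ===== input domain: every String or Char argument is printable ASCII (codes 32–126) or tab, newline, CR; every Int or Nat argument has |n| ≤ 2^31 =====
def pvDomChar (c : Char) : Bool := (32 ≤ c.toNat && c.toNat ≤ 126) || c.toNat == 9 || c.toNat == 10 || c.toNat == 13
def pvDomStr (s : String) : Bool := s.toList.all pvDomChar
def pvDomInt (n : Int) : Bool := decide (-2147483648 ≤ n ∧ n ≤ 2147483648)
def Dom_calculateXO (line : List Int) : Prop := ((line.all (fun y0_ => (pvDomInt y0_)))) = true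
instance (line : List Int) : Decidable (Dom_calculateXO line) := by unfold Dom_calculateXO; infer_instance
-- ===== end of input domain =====

-- B replaces A's single indexed loop with three branches by three idiomatic line.count scans.

-- ===== PORT A =====
-- A: loop i over range(len(line)); three independent ifs bump TotalO/TotalX/TotalEmpty; return (TotalO, TotalX, TotalEmpty)
def calculateXO (line : List Int) : Int × Int × Int :=
  (PySem.List.pyRange 0 (PySem.List.len line) 1).foldl
    (fun (st : Int × Int × Int) i =>
      (if PySem.List.pyGetD line i 0 == 1 then st.1 + 1 else st.1,
       if PySem.List.pyGetD line i 0 == 2 then st.2.1 + 1 else st.2.1,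
       if PySem.List.pyGetD line i 0 == 0 then st.2.2 + 1 else st.2.2))
    (0, 0, 0)

-- ===== PORT B =====
-- B: return line.count(1), line.count(2), line.count(0)
def calculateXO_alt (line : List Int) : Int × Int × Int :=
  ((PySem.List.count line 1 : Int), (PySem.List.count line 2 : Int), (PySem.List.count line 0 : Int))

-- ===== PRECONDITION & SPEC =====
def Spec_calculateXO (line : List Int) (out : Int × Int × Int) : Prop := out = calculateXO_alt line
instance (line : List Int) (out : Int × Int × Int) : Decidable (Spec_calculateXO line out) := by unfold Spec_calculateXO; infer_instance

-- ===== CLAIM (what is proved, stated in full; the proofs are below) =====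
def Claim_equal_calculateXO : Prop := ∀ (line : List Int), Dom_calculateXO line → Spec_calculateXO line (calculateXO line)

-- ===== LEMMAS AND PROOFS =====

-- ===== VERDICT (by name: the statement is the Claim_ definition above) =====
theorem calculateXO_spec : Claim_equal_calculateXO := by
  intro line _
  show calculateXO line = calculateXO_alt line
  unfold calculateXO calculateXO_alt
  have h := PySem.List.foldl_pyRange_pyGetD line 0
        (fun (st : Int × Int × Int) x =>
          (if x == 1 then st.1 + 1 else st.1,
           if x == 2 then st.2.1 + 1 else st.2.1,
           if x == 0 then st.2.2 + 1 else st.2.2))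
        ((0 : Int), (0 : Int), (0 : Int)) (a := 0) (by omega)
  simp only [Int.toNat_zero, List.drop_zero] at h
  rw [h]
  rw [PySem.List.foldl_prod_mk
        (f := fun (a : Int) x => if x == 1 then a + 1 else a)
        (g := fun (p : Int × Int) x =>
          (if x == 2 then p.1 + 1 else p.1, if x == 0 then p.2 + 1 else p.2)),
      PySem.List.foldl_prod_mk
        (f := fun (a : Int) x => if x == 2 then a + 1 else a)
        (g := fun (a : Int) x => if x == 0 then a + 1 else a),
      PySem.List.foldl_beq_add_one, PySem.List.foldl_beq_add_one, PySem.List.foldl_beq_add_one]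
  simp [PySem.List.count]
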